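-- pv_equiv track=rewrite | github.com/yaigorian/python_mipt_dafe_tasks_sem2 | solutions/sem01/lesson04/task1.py | get_nth_digit
-- ===== SOURCE A (Python) =====
-- def get_nth_digit(num: int) -> int:
--     le = 1
--     while True:
--         first = 10 ** (le - 1) * int(le != 1)
--         if num <= (b := (10**le - first) // 2 * le):
--             m = (num - 1) % le
--             number = first + 2 * ((num - 1) // le)
--             while number >= 0:
--                 le -= 1
--                 if le == m:
--                     return number % 10
--                 number //= 10
--         le += 1
--         num -= b
-- ===== SOURCE B (Python) =====
-- def get_nth_digit(num: int) -> int: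
--     # nth (one-based) digit of the concatenation of the decimal digits of 0, 2, 4, 6, ...
--     if num < 1:
--         raise ValueError("num must be a positive one-based index")
--
--     def pref(i: int) -> int:
--         # total number of digits in the concatenation of the first i evens 0,2,...,2*(i-1)
--         total, length, start, cnt = 0, 1, 0, 5
--         while start < i:
--             total += length * min(i - start, cnt)
--             length += 1
--             start += cnt
--             cnt = 45 * 10 ** (length - 2)
--         return total
--
--     lo, hi = 0, 1
--     while pref(hi) < num:            # exponential search for an index with enough digits
--         lo, hi = hi, 2 * hi
--     while hi - lo > 1:               # binary search: smallest hi with pref(hi) >= num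
--         mid = (lo + hi) // 2
--         if pref(mid) >= num:
--             hi = mid
--         else:
--             lo = mid
--     e = 2 * (hi - 1)                 # the even number that contains digit num
--     length, t = 1, e                 # digit count of e
--     while t >= 10:
--         t //= 10
--         length += 1
--     return e // 10 ** (length - 1 - (num - 1 - pref(lo))) % 10
-- ===== Notes on version B (the rewrite author's own statement) =====
-- stated objective: alternative
-- what changed: B replaces A's sequential per-length block subtraction and digit-peeling inner while by a monotone prefix-digit-count function pref(i) (digits of the first i even numbers) located via exponential plus binary search over the even-number index, then a closed-form digit extraction.
-- outside the precondition, e.g. on get_nth_digit(0): A returns 0, B raises ValueError; on get_nth_digit(-10): A returns 8, B raises ValueError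
import Mathlib
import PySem

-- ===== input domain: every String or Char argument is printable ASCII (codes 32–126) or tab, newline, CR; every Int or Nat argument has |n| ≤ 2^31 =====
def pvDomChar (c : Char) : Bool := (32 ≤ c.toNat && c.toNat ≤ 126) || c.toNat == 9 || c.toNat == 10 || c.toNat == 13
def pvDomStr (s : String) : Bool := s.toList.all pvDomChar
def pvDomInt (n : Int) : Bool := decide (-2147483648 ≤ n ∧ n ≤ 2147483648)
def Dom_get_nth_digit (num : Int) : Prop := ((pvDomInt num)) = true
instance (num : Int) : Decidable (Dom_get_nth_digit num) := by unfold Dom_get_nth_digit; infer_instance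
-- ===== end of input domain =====

-- B locates the even number by exponential + binary search over a monotone prefix-digit-count
-- function instead of A's sequential block subtraction and digit-peeling (alternative algorithm).


-- ===== PORT A =====
-- inner `while number >= 0:` loop; returns .inl digit on `return number % 10`,
-- .inr le when the loop condition fails and control falls back to the outer loop.
-- fuel only makes the recursion total; it is large enough on every input Pre_ admits.
def pvAInner (number le m : Int) : Nat → Sum Int Int
  | 0 => Sum.inr le              -- fuel exhausted (unreachable under Pre_)
  | fuel + 1 =>
    if number ≥ 0 then
      let le' := le - 1
      if le' = m then Sum.inl (PySem.Int.mod number 10)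
      else pvAInner (PySem.Int.floordiv number 10) le' m fuel
    else Sum.inr le

-- outer `while True:` loop of A; fuel 64 covers every |num| ≤ 2^31 (proved below).
-- 10 ** (le - 1) with le ≥ 1 on every reachable state, hence the .toNat exponent is exact.
def pvAOuter : Nat → Int → Int → Int
  | 0, _, _ => 0                 -- fuel exhausted (unreachable under Pre_)
  | fuel + 1, le, num =>
    let first : Int := (10:Int) ^ (le - 1).toNat * (if le ≠ 1 then 1 else 0)
    let b := PySem.Int.floordiv ((10:Int) ^ le.toNat - first) 2 * le
    if num ≤ b then
      let m := PySem.Int.mod (num - 1) le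
      let number := first + 2 * (PySem.Int.floordiv (num - 1) le)
      match pvAInner number le m (le.toNat + 2) with
      | Sum.inl d => d
      | Sum.inr le'' => pvAOuter fuel (le'' + 1) (num - b)
    else pvAOuter fuel (le + 1) (num - b)

def get_nth_digit (num : Int) : Int := pvAOuter 64 1 num

-- ===== PORT B =====
-- `while start < i:` loop of B's helper pref; state (total, length, start, cnt).
-- fuel only makes the recursion total; 66 covers every index the searches reach.
def pvPrefLoop : Nat → Int → Int → Int → Int → Int → Int
  | 0, total, _, _, _, _ => total          -- fuel exhausted (unreachable under Pre_)
  | f + 1, total, length, start, cnt, i =>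
    if start < i then
      let total' := total + length * min (i - start) cnt
      let length' := length + 1
      let start' := start + cnt
      pvPrefLoop f total' length' start' (45 * (10:Int) ^ (length' - 2).toNat) i
    else total

-- pref(i): digits in the concatenation of the first i even numbers
def pvPref (i : Int) : Int := pvPrefLoop 66 0 1 0 5 i

-- `while pref(hi) < num:` exponential search; returns (lo, hi)
def pvExpLoop (num : Int) : Nat → Int → Int → Int × Int
  | 0, lo, hi => (lo, hi)                  -- fuel exhausted (unreachable under Pre_)
  | f + 1, lo, hi => if pvPref hi < num then pvExpLoop num f hi (2 * hi) else (lo, hi)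

-- `while hi - lo > 1:` bisection; returns (lo, hi)
def pvBisLoop (num : Int) : Nat → Int → Int → Int × Int
  | 0, lo, hi => (lo, hi)                  -- fuel exhausted (unreachable under Pre_)
  | f + 1, lo, hi =>
    if hi - lo > 1 then
      let mid := PySem.Int.floordiv (lo + hi) 2
      if pvPref mid ≥ num then pvBisLoop num f lo mid else pvBisLoop num f mid hi
    else (lo, hi)

-- `while t >= 10:` digit-count loop
def pvDlenLoop : Nat → Int → Int → Int
  | 0, _, length => length                 -- fuel exhausted (unreachable under Pre_)
  | f + 1, t, length => if t ≥ 10 then pvDlenLoop f (PySem.Int.floordiv t 10) (length + 1) else length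

-- the 10 ** (length - 1 - r) exponent is nonnegative on every admitted input (proved below),
-- so the .toNat is exact there.
def get_nth_digit_alt (num : Int) : Int :=
  if num < 1 then 0              -- Python B raises ValueError here; outside Pre_
  else
    let p := pvExpLoop num 64 0 1
    let q := pvBisLoop num 65 p.1 p.2
    let lo := q.1
    let hi := q.2
    let e := 2 * (hi - 1)
    let length := pvDlenLoop 64 e 1
    PySem.Int.mod (PySem.Int.floordiv e ((10:Int) ^ (length - 1 - (num - 1 - pvPref lo)).toNat)) 10

-- ===== PRECONDITION & SPEC =====
-- Pre_ excludes num ≤ 0: there A's returned value is an accident of floor division on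
-- negative intermediates, and B, a natural one-based index search, raises ValueError there.
def Pre_get_nth_digit (num : Int) : Prop := 1 ≤ num
instance (num : Int) : Decidable (Pre_get_nth_digit num) := by unfold Pre_get_nth_digit; infer_instance
def pvWitness_get_nth_digit : Int := 12

def Spec_get_nth_digit (num : Int) (out : Int) : Prop := out = get_nth_digit_alt num
instance (num : Int) (out : Int) : Decidable (Spec_get_nth_digit num out) := by unfold Spec_get_nth_digit; infer_instance

-- ===== CLAIM (what is proved, stated in full; the proofs are below) =====
def Claim_equal_get_nth_digit : Prop := ∀ (num : Int), Dom_get_nth_digit num → Pre_get_nth_digit num → Spec_get_nth_digit num (get_nth_digit num)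

-- ===== LEMMAS AND PROOFS =====

-- A's per-length block size b, as A computes it.
def pvBval (le : Int) : Int :=
  PySem.Int.floordiv ((10:Int) ^ le.toNat - (10:Int) ^ (le - 1).toNat * (if le ≠ 1 then 1 else 0)) 2 * le

-- total digits in the blocks of lengths le, le+1, …, le+f-1
def pvSumB (le : Int) : Nat → Int
  | 0 => 0
  | f + 1 => pvBval le + pvSumB (le + 1) f

-- count of evens whose decimal length is n (n ≥ 1)
def pvCnt : Nat → Int
  | 0 => 0
  | 1 => 5
  | n + 2 => 45 * (10:Int) ^ n

-- count of evens with decimal length ≤ n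
def pvStart : Nat → Int
  | 0 => 0
  | n + 1 => pvStart n + pvCnt (n + 1)

-- total digits of the evens with decimal length ≤ n
def pvP : Nat → Int
  | 0 => 0
  | n + 1 => pvP n + pvCnt (n + 1) * ((n : Int) + 1)

theorem pvBval_succ (le : Int) (h : 1 ≤ le) :
    45 * 10 ^ (le + 1 - 2).toNat * (le + 1) = pvBval (le + 1) := by
  obtain ⟨k, rfl⟩ := Int.eq_ofNat_of_zero_le (by omega : (0:Int) ≤ le)
  have hk : 1 ≤ k := by exact_mod_cast h
  unfold pvBval
  rw [PySem.Int.floordiv_eq_ediv_of_pos (by norm_num)]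
  have h1 : ((k:Int) + 1 - 2).toNat = k - 1 := by omega
  have h2 : ((k:Int) + 1).toNat = k + 1 := by omega
  have h3 : ((k:Int) + 1 - 1).toNat = k := by omega
  rw [h1, h2, h3]
  have hne : ((k:Int) + 1 ≠ 1) := by omega
  rw [if_pos hne, mul_one]
  have hpow : (10:Int) ^ (k + 1) = 10 ^ (k - 1) * 100 := by
    have : k + 1 = (k - 1) + 2 := by omega
    rw [this, pow_add]; norm_num
  have hpowk : (10:Int) ^ k = 10 ^ (k - 1) * 10 := by
    have : k = (k - 1) + 1 := by omega
    rw [this, pow_add]; norm_num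
  rw [hpow, hpowk]
  have : (10:Int) ^ (k - 1) * 100 - 10 ^ (k - 1) * 10 = (45 * 10 ^ (k - 1)) * 2 := by ring
  rw [this, Int.mul_ediv_cancel _ (by norm_num)]

theorem pvCnt_bval (k : Nat) : pvBval ((k : Int) + 1) = pvCnt (k + 1) * ((k : Int) + 1) := by
  cases k with
  | zero => decide
  | succ n =>
    have h := pvBval_succ ((n : Int) + 1) (by omega)
    have hcast : ((n + 1 : Nat) : Int) + 1 = ((n : Int) + 1) + 1 := by push_cast; ring
    rw [hcast, ← h]
    have he : ((n : Int) + 1 + 1 - 2).toNat = n := by omega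
    rw [he]
    show 45 * (10:Int) ^ n * ((n:Int) + 2) = pvCnt (n + 2) * (((n+1:Nat) : Int) + 1)
    unfold pvCnt
    push_cast
    ring

theorem pvCnt_pos (n : Nat) : 0 < pvCnt (n + 1) := by
  cases n with
  | zero => decide
  | succ m => show (0:Int) < 45 * 10 ^ m; positivity

theorem pvStart_lt {a b : Nat} (h : a < b) : pvStart a < pvStart b := by
  induction b with
  | zero => omega
  | succ n ih =>
    have hs : pvStart (n + 1) = pvStart n + pvCnt (n + 1) := rfl
    rcases Nat.lt_succ_iff_lt_or_eq.mp h with h' | h'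
    · exact lt_trans (ih h') (by have := pvCnt_pos n; omega)
    · subst h'; have := pvCnt_pos a; omega

theorem pvStart_mono {a b : Nat} (h : a ≤ b) : pvStart a ≤ pvStart b := by
  rcases Nat.lt_or_ge a b with h' | h'
  · exact le_of_lt (pvStart_lt h')
  · have : a = b := by omega
    subst this; exact le_refl _

theorem pvP_nonneg (n : Nat) : 0 ≤ pvP n := by
  induction n with
  | zero => exact le_refl _
  | succ m ih =>
    have h1 := pvCnt_pos m
    have h2 : (0:Int) ≤ pvCnt (m + 1) * ((m : Int) + 1) :=
      mul_nonneg (le_of_lt h1) (by positivity)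
    unfold pvP; omega

theorem pvStart_val (n : Nat) : pvStart (n + 1) = 5 * (10:Int) ^ n := by
  induction n with
  | zero => decide
  | succ m ih =>
    show pvStart (m + 1) + pvCnt (m + 2) = 5 * (10:Int) ^ (m + 1)
    rw [ih]
    show 5 * (10:Int) ^ m + 45 * 10 ^ m = 5 * 10 ^ (m + 1)
    rw [pow_succ]; ring

-- the digit-peeling inner while returns the m-th decimal digit in closed form.
theorem pvAInner_eq (fuel : Nat) : ∀ (number le m : Int), 0 ≤ number → 0 ≤ m → m < le →
    (le - m).toNat ≤ fuel →
    pvAInner number le m fuel =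
      Sum.inl (PySem.Int.mod (PySem.Int.floordiv number (10 ^ (le - 1 - m).toNat)) 10) := by
  induction fuel with
  | zero => intro number le m h0 hm hlt hf; omega
  | succ f ih =>
    intro number le m h0 hm hlt hf
    unfold pvAInner
    rw [if_pos h0]
    by_cases hle : le - 1 = m
    · rw [if_pos hle]
      have : (le - 1 - m).toNat = 0 := by omega
      rw [this]
      simp [PySem.Int.floordiv]
    · rw [if_neg hle]
      have hlt' : m < le - 1 := by omega
      rw [ih _ _ _ (by
          rw [PySem.Int.floordiv_eq_ediv_of_pos (by norm_num)]
          exact Int.ediv_nonneg h0 (by norm_num)) hm hlt' (by omega)]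
      congr 2
      rw [PySem.Int.floordiv_eq_ediv_of_pos (by norm_num),
          PySem.Int.floordiv_eq_ediv_of_pos (a := number) (by positivity),
          PySem.Int.floordiv_eq_ediv_of_pos (by positivity)]
      rw [Int.ediv_ediv_of_nonneg (show (0:Int) ≤ 10 by norm_num)]
      congr 1
      have hexp : (le - 1 - m).toNat = (le - 1 - 1 - m).toNat + 1 := by omega
      rw [hexp, pow_succ]
      ring

-- pvPrefLoop is additive in its accumulator
theorem pvPrefLoop_add (f : Nat) : ∀ (t L s c i : Int),
    pvPrefLoop f t L s c i = t + pvPrefLoop f 0 L s c i := by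
  induction f with
  | zero => intro t L s c i; simp [pvPrefLoop]
  | succ g ih =>
    intro t L s c i
    show pvPrefLoop (g + 1) t L s c i = t + pvPrefLoop (g + 1) 0 L s c i
    unfold pvPrefLoop
    by_cases hs : s < i
    · rw [if_pos hs, if_pos hs]
      rw [ih (t + L * min (i - s) c), ih (0 + L * min (i - s) c)]
      ring
    · rw [if_neg hs, if_neg hs]; ring

-- the accumulator never decreases
theorem pvPrefLoop_ge (f : Nat) : ∀ (t L s c i : Int), 0 ≤ L → 0 ≤ c →
    t ≤ pvPrefLoop f t L s c i := by
  induction f with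
  | zero => intro t L s c i _ _; simp [pvPrefLoop]
  | succ g ih =>
    intro t L s c i hL hc
    show t ≤ pvPrefLoop (g + 1) t L s c i
    unfold pvPrefLoop
    by_cases hs : s < i
    · rw [if_pos hs]
      have hmin : 0 ≤ min (i - s) c := le_min (by omega) hc
      have h1 : t ≤ t + L * min (i - s) c := by nlinarith
      exact le_trans h1 (ih _ _ _ _ _ (by omega) (by positivity))
    · rw [if_neg hs]

-- monotone in the target index
theorem pvPrefLoop_mono (f : Nat) : ∀ (t L s c i j : Int), 0 ≤ L → 0 ≤ c → i ≤ j →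
    pvPrefLoop f t L s c i ≤ pvPrefLoop f t L s c j := by
  induction f with
  | zero => intro t L s c i j _ _ _; simp [pvPrefLoop]
  | succ g ih =>
    intro t L s c i j hL hc hij
    show pvPrefLoop (g + 1) t L s c i ≤ pvPrefLoop (g + 1) t L s c j
    unfold pvPrefLoop
    by_cases hsi : s < i
    · rw [if_pos hsi, if_pos (by omega : s < j)]
      have hmin : min (i - s) c ≤ min (j - s) c := by
        rcases le_total (i - s) c with h | h <;> rcases le_total (j - s) c with h' | h' <;>
          simp [min_def] <;> omega
      have ht : t + L * min (i - s) c ≤ t + L * min (j - s) c := by nlinarith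
      calc pvPrefLoop g (t + L * min (i - s) c) (L+1) (s+c) (45 * (10:Int) ^ (L+1-2).toNat) i
          ≤ pvPrefLoop g (t + L * min (j - s) c) (L+1) (s+c) (45 * (10:Int) ^ (L+1-2).toNat) i := by
            rw [pvPrefLoop_add g (t + L * min (i - s) c), pvPrefLoop_add g (t + L * min (j - s) c)]
            omega
        _ ≤ pvPrefLoop g (t + L * min (j - s) c) (L+1) (s+c) (45 * (10:Int) ^ (L+1-2).toNat) j :=
            ih _ _ _ _ _ _ (by omega) (by positivity) hij
    · rw [if_neg hsi]
      by_cases hsj : s < j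
      · rw [if_pos hsj]
        have hmin : 0 ≤ min (j - s) c := le_min (by omega) hc
        have h1 : t ≤ t + L * min (j - s) c := by nlinarith
        exact le_trans h1 (pvPrefLoop_ge g _ _ _ _ _ (by omega) (by positivity))
      · rw [if_neg hsj]

theorem pvPref_mono {i j : Int} (h : i ≤ j) : pvPref i ≤ pvPref j := by
  exact pvPrefLoop_mono 66 0 1 0 5 i j (by norm_num) (by norm_num) h

theorem pvPrefLoop_go (g : Nat) (t L s c i : Int) (h : s < i) :
    pvPrefLoop (g + 1) t L s c i =
      pvPrefLoop g (t + L * min (i - s) c) (L + 1) (s + c) (45 * (10:Int) ^ (L + 1 - 2).toNat) i := by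
  conv_lhs => unfold pvPrefLoop
  rw [if_pos h]

theorem pvPrefLoop_stop (g : Nat) (t L s c i : Int) (h : ¬ s < i) :
    pvPrefLoop (g + 1) t L s c i = t := by
  conv_lhs => unfold pvPrefLoop
  rw [if_neg h]

-- value of the pref loop from the entry state of block a+1 at an index inside block a+d+1
theorem pvPref_block : ∀ (d a : Nat) (t : Int) (f : Nat), 0 ≤ t → t ≤ pvCnt (a + d + 1) → d + 2 ≤ f →
    pvPrefLoop f 0 ((a : Int) + 1) (pvStart a) (pvCnt (a + 1)) (pvStart (a + d) + t) =
      (pvP (a + d) - pvP a) + ((a : Int) + (d : Int) + 1) * t := by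
  intro d
  induction d with
  | zero =>
    intro a t f h0 h1 hf
    simp only [Nat.add_zero] at h1 ⊢
    cases f with
    | zero => omega
    | succ f1 =>
      cases f1 with
      | zero => omega
      | succ f2 =>
        by_cases ht : 0 < t
        · rw [pvPrefLoop_go _ _ _ _ _ _ (by omega : pvStart a < pvStart a + t)]
          rw [show pvStart a + t - pvStart a = t from by ring, min_eq_left h1]
          rw [pvPrefLoop_stop _ _ _ _ _ _ (by omega : ¬ pvStart a + pvCnt (a + 1) < pvStart a + t)]
          push_cast; ring
        · have ht0 : t = 0 := by omega
          subst ht0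
          rw [pvPrefLoop_stop _ _ _ _ _ _ (by omega : ¬ pvStart a < pvStart a + 0)]
          push_cast; ring
  | succ d ih =>
    intro a t f h0 h1 hf
    cases f with
    | zero => omega
    | succ g =>
      have hAlt : a + (d + 1) = (a + 1) + d := by omega
      rw [hAlt] at h1 ⊢
      have hstep : pvStart a < pvStart ((a + 1) + d) + t := by
        have := pvStart_lt (show a < (a + 1) + d by omega); omega
      rw [pvPrefLoop_go _ _ _ _ _ _ hstep]
      have hmono : pvStart (a + 1) ≤ pvStart ((a + 1) + d) := pvStart_mono (by omega)
      have hstart1 : pvStart (a + 1) = pvStart a + pvCnt (a + 1) := rfl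
      rw [min_eq_right (by omega : pvCnt (a + 1) ≤ pvStart ((a + 1) + d) + t - pvStart a)]
      rw [show ((a:Int) + 1) + 1 = (((a + 1 : Nat)):Int) + 1 from by push_cast; ring]
      rw [show pvStart a + pvCnt (a + 1) = pvStart (a + 1) from rfl]
      rw [show (45 * (10:Int) ^ ((((a + 1 : Nat)):Int) + 1 - 2).toNat) = pvCnt ((a + 1) + 1) from by
            have he : ((((a + 1 : Nat)):Int) + 1 - 2).toNat = a := by push_cast; omega
            rw [he]; rfl]
      rw [pvPrefLoop_add]
      rw [ih (a + 1) t g h0 h1 (by omega)]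
      have hP : pvP (a + 1) = pvP a + pvCnt (a + 1) * ((a:Int) + 1) := rfl
      rw [hP]
      push_cast; ring

theorem pvPref_at (k : Nat) (t : Int) (h0 : 0 ≤ t) (h1 : t ≤ pvCnt (k + 1)) (hk : k ≤ 64) :
    pvPref (pvStart k + t) = pvP k + ((k : Int) + 1) * t := by
  have h := pvPref_block k 0 t 66 h0 (by simpa using h1) (by omega)
  unfold pvPref
  simp only [Nat.zero_add] at h
  have h0s : pvStart 0 = 0 := rfl
  have h0p : pvP 0 = 0 := rfl
  have h0c : pvCnt 1 = 5 := rfl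
  rw [h0s, h0c, h0p] at h
  simpa using h

theorem pvPref_big : (2147483648 : Int) ≤ pvPref 2147483648 := by decide

theorem pvExpLoop_go (num : Int) (f : Nat) (lo hi : Int) (h : pvPref hi < num) :
    pvExpLoop num (f + 1) lo hi = pvExpLoop num f hi (2 * hi) := by
  conv_lhs => unfold pvExpLoop
  rw [if_pos h]

theorem pvExpLoop_stop (num : Int) (f : Nat) (lo hi : Int) (h : ¬ pvPref hi < num) :
    pvExpLoop num (f + 1) lo hi = (lo, hi) := by
  conv_lhs => unfold pvExpLoop
  rw [if_neg h]

theorem pvBisLoop_left (num : Int) (f : Nat) (lo hi : Int) (h1 : hi - lo > 1)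
    (h2 : pvPref (PySem.Int.floordiv (lo + hi) 2) ≥ num) :
    pvBisLoop num (f + 1) lo hi = pvBisLoop num f lo (PySem.Int.floordiv (lo + hi) 2) := by
  conv_lhs => unfold pvBisLoop
  rw [if_pos h1, if_pos h2]

theorem pvBisLoop_right (num : Int) (f : Nat) (lo hi : Int) (h1 : hi - lo > 1)
    (h2 : ¬ pvPref (PySem.Int.floordiv (lo + hi) 2) ≥ num) :
    pvBisLoop num (f + 1) lo hi = pvBisLoop num f (PySem.Int.floordiv (lo + hi) 2) hi := by
  conv_lhs => unfold pvBisLoop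
  rw [if_pos h1, if_neg h2]

theorem pvBisLoop_stop (num : Int) (f : Nat) (lo hi : Int) (h : ¬ hi - lo > 1) :
    pvBisLoop num (f + 1) lo hi = (lo, hi) := by
  conv_lhs => unfold pvBisLoop
  rw [if_neg h]

theorem pvExpLoop_spec (num : Int) (h31 : num ≤ 2147483648) :
    ∀ (f : Nat) (lo hi : Int), 0 ≤ lo → lo < hi → pvPref lo < num →
      (2147483648 : Int) ≤ hi * 2 ^ f →
      0 ≤ (pvExpLoop num f lo hi).1 ∧ (pvExpLoop num f lo hi).1 < (pvExpLoop num f lo hi).2 ∧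
      pvPref (pvExpLoop num f lo hi).1 < num ∧ num ≤ pvPref (pvExpLoop num f lo hi).2 ∧
      (pvExpLoop num f lo hi).2 ≤ hi * 2 ^ f := by
  have hbig : ∀ h : Int, (2147483648:Int) ≤ h → num ≤ pvPref h := by
    intro h hh
    calc num ≤ 2147483648 := h31
      _ ≤ pvPref 2147483648 := pvPref_big
      _ ≤ pvPref h := pvPref_mono hh
  intro f
  induction f with
  | zero =>
    intro lo hi h0 hlh hlo hb
    simp only [pow_zero, mul_one] at hb
    simp only [pvExpLoop]
    exact ⟨h0, hlh, hlo, hbig hi hb, by simp⟩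
  | succ f ih =>
    intro lo hi h0 hlh hlo hb
    by_cases hc : pvPref hi < num
    · rw [pvExpLoop_go num f lo hi hc]
      have hb' : (2147483648:Int) ≤ 2 * hi * 2 ^ f := by
        have : hi * 2 ^ (f + 1) = 2 * hi * 2 ^ f := by rw [pow_succ]; ring
        omega
      have h := ih hi (2 * hi) (by omega) (by omega) hc hb'
      refine ⟨h.1, h.2.1, h.2.2.1, h.2.2.2.1, ?_⟩
      have : hi * 2 ^ (f + 1) = 2 * hi * 2 ^ f := by rw [pow_succ]; ring
      omega
    · rw [pvExpLoop_stop num f lo hi hc]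
      have h1 : (1:Int) ≤ 2 ^ (f + 1) := by
        have := pow_pos (show (0:Int) < 2 by norm_num) (f + 1); omega
      refine ⟨h0, hlh, hlo, by simpa using (by omega : num ≤ pvPref hi), ?_⟩
      simpa using le_mul_of_one_le_right (by omega : (0:Int) ≤ hi) h1

theorem pvBisLoop_spec (num : Int) : ∀ (f : Nat) (lo hi : Int), 0 ≤ lo → lo < hi →
    hi - lo ≤ 2 ^ f → pvPref lo < num → num ≤ pvPref hi →
    0 ≤ (pvBisLoop num f lo hi).1 ∧ (pvBisLoop num f lo hi).2 = (pvBisLoop num f lo hi).1 + 1 ∧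
    pvPref (pvBisLoop num f lo hi).1 < num ∧ num ≤ pvPref (pvBisLoop num f lo hi).2 := by
  intro f
  induction f with
  | zero =>
    intro lo hi h0 hlh hb hlo hhi
    simp only [pow_zero] at hb
    simp only [pvBisLoop]
    exact ⟨h0, by omega, hlo, by simpa [show hi = lo + 1 from by omega] using hhi⟩
  | succ f ih =>
    intro lo hi h0 hlh hb hlo hhi
    by_cases hgt : hi - lo > 1
    · have hmid : PySem.Int.floordiv (lo + hi) 2 = (lo + hi) / 2 :=
        PySem.Int.floordiv_eq_ediv_of_pos (by norm_num)
      have h2f : (1:Int) ≤ 2 ^ f := by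
        have := pow_pos (show (0:Int) < 2 by norm_num) f; omega
      have hpow : (2:Int) ^ (f + 1) = 2 * 2 ^ f := by rw [pow_succ]; ring
      by_cases hm : pvPref (PySem.Int.floordiv (lo + hi) 2) ≥ num
      · rw [pvBisLoop_left num f lo hi hgt hm]
        exact ih lo _ h0 (by rw [hmid]; omega) (by rw [hmid]; omega) hlo hm
      · rw [pvBisLoop_right num f lo hi hgt hm]
        exact ih _ hi (by rw [hmid]; omega) (by rw [hmid]; omega) (by rw [hmid]; omega)
          (by omega) hhi
    · rw [pvBisLoop_stop num f lo hi hgt]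
      exact ⟨h0, by omega, hlo, by simpa [show hi = lo + 1 from by omega] using hhi⟩

-- the two searches combined: B finds the unique bracketing index
theorem pvSearch_spec (num : Int) (hnum : 1 ≤ num) (h31 : num ≤ 2147483648) :
    0 ≤ (pvBisLoop num 65 (pvExpLoop num 64 0 1).1 (pvExpLoop num 64 0 1).2).1 ∧
    (pvBisLoop num 65 (pvExpLoop num 64 0 1).1 (pvExpLoop num 64 0 1).2).2 =
      (pvBisLoop num 65 (pvExpLoop num 64 0 1).1 (pvExpLoop num 64 0 1).2).1 + 1 ∧
    pvPref (pvBisLoop num 65 (pvExpLoop num 64 0 1).1 (pvExpLoop num 64 0 1).2).1 < num ∧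
    num ≤ pvPref (pvBisLoop num 65 (pvExpLoop num 64 0 1).1 (pvExpLoop num 64 0 1).2).2 := by
  have hpref0 : pvPref 0 = 0 := by decide
  have hexp := pvExpLoop_spec num h31 64 0 1 (le_refl 0) (by norm_num) (by omega)
    (by norm_num)
  obtain ⟨he0, helh, helo, hehi, hebd⟩ := hexp
  have hbd : (pvExpLoop num 64 0 1).2 - (pvExpLoop num 64 0 1).1 ≤ 2 ^ 65 := by
    have h1 : (1:Int) * 2 ^ 64 ≤ 2 ^ 65 := by norm_num
    omega
  exact pvBisLoop_spec num 65 _ _ he0 helh hbd helo hehi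

theorem pvPref_loc_unique {num l i : Int} (h1 : pvPref l < num) (h2 : num ≤ pvPref (l + 1))
    (h3 : pvPref i < num) (h4 : num ≤ pvPref (i + 1)) : l = i := by
  by_contra hne
  rcases lt_or_gt_of_ne hne with hlt | hgt
  · have h5 : l + 1 ≤ i := by omega
    have := pvPref_mono h5
    omega
  · have h5 : i + 1 ≤ l := by omega
    have := pvPref_mono h5
    omega

theorem pvDlenLoop_small (f : Nat) (t L : Int) (h : t < 10) : pvDlenLoop f t L = L := by
  cases f with
  | zero => rfl
  | succ g => unfold pvDlenLoop; rw [if_neg (by omega)]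

theorem pvDlenLoop_pow (k : Nat) : ∀ (f : Nat) (t L : Int), k ≤ f →
    (10:Int) ^ k ≤ t → t < 10 ^ (k + 1) → pvDlenLoop f t L = L + k := by
  induction k with
  | zero =>
    intro f t L _ h1 h2
    exact (by simpa using pvDlenLoop_small f t L (by simpa using h2))
  | succ n ih =>
    intro f t L hf h1 h2
    cases f with
    | zero => omega
    | succ g =>
      unfold pvDlenLoop
      have h10 : (10:Int) ≤ t := by
        calc (10:Int) = 10 ^ 1 := by norm_num
          _ ≤ 10 ^ (n + 1) := pow_le_pow_right₀ (by norm_num) (by omega)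
          _ ≤ t := h1
      rw [if_pos (by omega), PySem.Int.floordiv_eq_ediv_of_pos (by norm_num)]
      have hlow : (10:Int) ^ n ≤ t / 10 := by
        rw [Int.le_ediv_iff_mul_le (by norm_num)]
        calc (10:Int) ^ n * 10 = 10 ^ (n + 1) := by rw [pow_succ]
          _ ≤ t := h1
      have hhigh : t / 10 < (10:Int) ^ (n + 1) := by
        rw [Int.ediv_lt_iff_lt_mul (by norm_num)]
        calc t < (10:Int) ^ (n + 1 + 1) := h2
          _ = 10 ^ (n + 1) * 10 := by rw [pow_succ]
      rw [ih g (t / 10) (L + 1) (by omega) hlow hhigh]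
      push_cast; ring

theorem pvSumB_big : (2147483648 : Int) ≤ pvSumB 1 64 := by decide

theorem pvAOuter_step (g : Nat) (le num : Int) :
    pvAOuter (g + 1) le num =
      (if num ≤ pvBval le then
        match pvAInner ((10:Int) ^ (le - 1).toNat * (if le ≠ 1 then 1 else 0) +
            2 * (PySem.Int.floordiv (num - 1) le)) le (PySem.Int.mod (num - 1) le)
            (le.toNat + 2) with
        | Sum.inl d => d
        | Sum.inr le'' => pvAOuter g (le'' + 1) (num - pvBval le)
      else pvAOuter g (le + 1) (num - pvBval le)) := by
  conv_lhs => unfold pvAOuter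
  rfl

theorem pvAlt_pos (num : Int) (h : 1 ≤ num) :
    get_nth_digit_alt num =
      PySem.Int.mod (PySem.Int.floordiv
        (2 * ((pvBisLoop num 65 (pvExpLoop num 64 0 1).1 (pvExpLoop num 64 0 1).2).2 - 1))
        ((10:Int) ^ ((pvDlenLoop 64 (2 * ((pvBisLoop num 65 (pvExpLoop num 64 0 1).1 (pvExpLoop num 64 0 1).2).2 - 1)) 1) - 1 -
          (num - 1 - pvPref (pvBisLoop num 65 (pvExpLoop num 64 0 1).1 (pvExpLoop num 64 0 1).2).1)).toNat)) 10 := by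
  unfold get_nth_digit_alt
  rw [if_neg (by omega)]

-- the even number A assembles is twice its global index
theorem pvNumber_eq (k : Nat) (q : Int) :
    (10:Int) ^ (((k:Int) + 1 - 1)).toNat * (if ((k:Int) + 1) ≠ 1 then 1 else 0) + 2 * q =
      2 * (pvStart k + q) := by
  cases k with
  | zero => simp [pvStart]
  | succ n =>
    rw [if_pos (by push_cast; omega), pvStart_val n]
    have he : (((n + 1 : Nat):Int) + 1 - 1).toNat = n + 1 := by push_cast; omega
    rw [he, mul_one, pow_succ]
    ring

-- B's digit-count loop on that even number gives the block length
theorem pvDlen_eq (k : Nat) (q : Int) (hq0 : 0 ≤ q) (hqlt : q < pvCnt (k + 1))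
    (hk : k ≤ 63) :
    pvDlenLoop 64 (2 * (pvStart k + q)) 1 = (k:Int) + 1 := by
  cases k with
  | zero =>
    have h0s : pvStart 0 = 0 := rfl
    have hc5 : pvCnt (0 + 1) = 5 := rfl
    rw [pvDlenLoop_small 64 _ 1 (by omega)]
    norm_num
  | succ n =>
    rw [pvStart_val n]
    have hcnt : pvCnt (n + 1 + 1) = 45 * (10:Int) ^ n := rfl
    have hps : (10:Int) ^ (n + 1) = 10 ^ n * 10 := pow_succ 10 n
    have hps2 : (10:Int) ^ (n + 1 + 1) = 10 ^ n * 100 := by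
      rw [pow_succ, pow_succ]; ring
    have hlow : (10:Int) ^ (n + 1) ≤ 2 * (5 * 10 ^ n + q) := by omega
    have hhigh : 2 * (5 * (10:Int) ^ n + q) < 10 ^ (n + 1 + 1) := by omega
    rw [pvDlenLoop_pow (n + 1) 64 _ 1 (by omega) hlow hhigh]
    push_cast; ring

-- A's outer loop, started at block k+1 with the digits of shorter evens already consumed,
-- returns exactly B's value at the original index num0.
theorem pvA_alt (f : Nat) : ∀ (k : Nat) (num0 : Int), num0 ≤ 2147483648 →
    1 ≤ num0 - pvP k → num0 - pvP k ≤ pvSumB ((k : Int) + 1) f → k + f ≤ 64 →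
    pvAOuter f ((k : Int) + 1) (num0 - pvP k) = get_nth_digit_alt num0 := by
  induction f with
  | zero =>
    intro k num0 _ h1 h2 _
    exfalso; unfold pvSumB at h2; omega
  | succ g ih =>
    intro k num0 h31 h1 h2 hk
    have hP0 := pvP_nonneg k
    have hnum1 : 1 ≤ num0 := by omega
    have hb := pvCnt_bval k
    have hcp := pvCnt_pos k
    rw [pvAOuter_step]
    by_cases hc : num0 - pvP k ≤ pvBval ((k:Int) + 1)
    · rw [if_pos hc]
      rw [PySem.Int.mod_eq_emod_of_pos (by omega), PySem.Int.floordiv_eq_ediv_of_pos (by omega)]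
      set q := (num0 - pvP k - 1) / ((k:Int) + 1) with hqdef
      set m := (num0 - pvP k - 1) % ((k:Int) + 1) with hmdef
      have hm0 : 0 ≤ m := Int.emod_nonneg _ (by omega)
      have hmlt : m < (k:Int) + 1 := Int.emod_lt_of_pos _ (by omega)
      have hqm : ((k:Int) + 1) * q + m = num0 - pvP k - 1 := Int.ediv_add_emod _ _
      have hq0 : 0 ≤ q := Int.ediv_nonneg (by omega) (by omega)
      have hqlt : q < pvCnt (k + 1) := by
        by_contra hq'
        push_neg at hq'
        have hmul : ((k:Int) + 1) * pvCnt (k + 1) ≤ ((k:Int) + 1) * q :=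
          mul_le_mul_of_nonneg_left hq' (by omega)
        rw [mul_comm] at hmul
        omega
      rw [pvNumber_eq k q]
      have hE0 : 0 ≤ 2 * (pvStart k + q) := by
        have hsm := pvStart_mono (Nat.zero_le k)
        have h0s : pvStart 0 = 0 := rfl
        omega
      rw [pvAInner_eq _ _ _ _ hE0 hm0 hmlt (by omega)]
      rw [pvAlt_pos num0 hnum1]
      obtain ⟨hl0, hsucc, hlow, hhigh⟩ := pvSearch_spec num0 hnum1 (by omega)
      have hpi : pvPref (pvStart k + q) = pvP k + ((k:Int) + 1) * q :=
        pvPref_at k q hq0 (le_of_lt hqlt) (by omega)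
      have hpi1 : pvPref (pvStart k + q + 1) = pvP k + ((k:Int) + 1) * (q + 1) := by
        have h := pvPref_at k (q + 1) (by omega) (by omega) (by omega)
        rw [show pvStart k + (q + 1) = pvStart k + q + 1 from by ring] at h
        exact h
      have hmul1 : ((k:Int) + 1) * (q + 1) = ((k:Int) + 1) * q + ((k:Int) + 1) := by ring
      have hlt : pvPref (pvStart k + q) < num0 := by rw [hpi]; omega
      have hge : num0 ≤ pvPref (pvStart k + q + 1) := by rw [hpi1, hmul1]; omega
      have hleq : (pvBisLoop num0 65 (pvExpLoop num0 64 0 1).1 (pvExpLoop num0 64 0 1).2).1 =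
          pvStart k + q :=
        pvPref_loc_unique hlow (by rw [hsucc] at hhigh; exact hhigh) hlt hge
      rw [hsucc, hleq, show pvStart k + q + 1 - 1 = pvStart k + q from by ring]
      rw [pvDlen_eq k q hq0 hqlt (by omega), hpi]
      rw [show (k:Int) + 1 - 1 - (num0 - 1 - (pvP k + ((k:Int) + 1) * q)) = (k:Int) + 1 - 1 - m
          from by omega]
    · rw [if_neg hc]
      have hsum : pvSumB ((k:Int) + 1) (g + 1) = pvBval ((k:Int) + 1) + pvSumB ((k:Int) + 1 + 1) g := rfl
      have hP1 : pvP (k + 1) = pvP k + pvCnt (k + 1) * ((k:Int) + 1) := rfl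
      have hcast : ((k:Int) + 1) + 1 = (((k + 1 : Nat)):Int) + 1 := by push_cast; ring
      rw [show num0 - pvP k - pvBval ((k:Int) + 1) = num0 - pvP (k + 1) from by
            rw [hP1, hb]; ring]
      rw [hcast]
      exact ih (k + 1) num0 h31 (by omega) (by rw [← hcast]; omega) (by omega)

-- ===== VERDICT (by name: the statement is the Claim_ definition above) =====
theorem get_nth_digit_spec : Claim_equal_get_nth_digit := by
  intro num hdom hpre
  unfold Pre_get_nth_digit at hpre
  have hdom' : num ≤ 2147483648 := by
    unfold Dom_get_nth_digit pvDomInt at hdom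
    simpa using (of_decide_eq_true hdom).2
  unfold Spec_get_nth_digit get_nth_digit
  have h := pvA_alt 64 0 num hdom' (by simpa [pvP] using hpre)
    (by simpa [pvP] using le_trans hdom' pvSumB_big) (by norm_num)
  simpa [pvP] using h
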